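-- pv_equiv track=rewrite | github.com/robotics-projects-sumukh/RBE-549-Computer-Vision-P1-My-AutoPano | Phase2/Code/utils.py | find_optimal_ordering
-- ===== SOURCE A (Python) =====
-- def find_optimal_ordering(graph, weights, start_node):
--     """
--     Find optimal ordering of images using a modified DFS
--     Returns ordered list of image indices
--     """
--     visited = set()
--     ordered = []
--
--     def dfs(node):
--         if node in visited:
--             return
--         visited.add(node)
--         ordered.append(node)
--
--         # Sort neighbors by weight
--         neighbors = [(n, weights.get((node, n), 0)) for n in graph[node]]
--         neighbors.sort(key=lambda x: x[1], reverse=True)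
--
--         for neighbor, _ in neighbors:
--             if neighbor not in visited:
--                 dfs(neighbor)
--
--     dfs(start_node)
--     return ordered
-- ===== SOURCE B (Python) =====
-- def find_optimal_ordering(graph, weights, start_node):
--     """
--     Find optimal ordering of images using an iterative DFS with an explicit stack
--     Returns ordered list of image indices
--     """
--     visited = set()
--     ordered = []
--     stack = [start_node]
--
--     while stack:
--         node = stack.pop()
--         if node in visited:
--             continue
--         visited.add(node)
--         ordered.append(node)
--
--         # Sort neighbors by weight
--         neighbors = [(n, weights.get((node, n), 0)) for n in graph[node]]
--         neighbors.sort(key=lambda x: x[1], reverse=True)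
--
--         # Push lowest-weight first so the highest-weight neighbor is popped next
--         for neighbor, _ in reversed(neighbors):
--             stack.append(neighbor)
--
--     return ordered
-- ===== Notes on version B (the rewrite author's own statement) =====
-- stated objective: alternative
-- what changed: Replaces the recursive DFS (nested closure mutating enclosing state) by an iterative DFS with an explicit stack: neighbors are pushed in reversed weight-sorted order and the visited check is done lazily at pop time, reproducing A's exact order without recursion (no recursion-depth limit).
import Mathlib
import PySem

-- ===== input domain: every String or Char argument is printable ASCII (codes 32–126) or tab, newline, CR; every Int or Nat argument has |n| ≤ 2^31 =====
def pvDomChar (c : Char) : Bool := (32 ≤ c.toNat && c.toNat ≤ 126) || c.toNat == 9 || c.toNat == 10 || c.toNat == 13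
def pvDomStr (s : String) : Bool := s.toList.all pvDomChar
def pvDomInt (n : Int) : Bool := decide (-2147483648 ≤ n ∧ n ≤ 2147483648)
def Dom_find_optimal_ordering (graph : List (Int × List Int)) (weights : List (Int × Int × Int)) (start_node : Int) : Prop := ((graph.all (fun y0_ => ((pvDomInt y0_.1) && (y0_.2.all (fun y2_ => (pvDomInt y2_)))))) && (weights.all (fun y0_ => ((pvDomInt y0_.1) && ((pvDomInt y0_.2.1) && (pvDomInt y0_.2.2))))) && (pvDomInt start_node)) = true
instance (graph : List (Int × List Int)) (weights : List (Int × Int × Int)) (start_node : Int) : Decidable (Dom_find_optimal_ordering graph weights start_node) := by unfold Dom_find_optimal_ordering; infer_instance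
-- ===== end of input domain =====

-- B replaces A's recursive DFS by an iterative DFS with an explicit stack (lazy visited check,
-- neighbors pushed in reversed weight-sorted order); same return value, no recursion.


-- ===== PORT A =====
-- weights.get((a, b), 0): the tuple-keyed dict arrives as a list of (a, b, w) triples; first match wins
def pvWeightGet (weights : List (Int × Int × Int)) (a b : Int) : Int :=
  match weights with
  | [] => 0
  | (x, y, w) :: rest => if x = a ∧ y = b then w else pvWeightGet rest a b

-- neighbors = [(n, weights.get((node, n), 0)) for n in graph[node]]; neighbors.sort(key=.., reverse=True)
-- graph[node]: '.getD []' is only taken where the key is missing, i.e. where Python raises KeyError —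
-- those inputs are excluded by Pre_ below.
def pvSortedNbrs (graph : List (Int × List Int)) (weights : List (Int × Int × Int)) (node : Int) : List (Int × Int) :=
  let ns := ((PySem.Dict.mk graph).get? node).getD []
  PySem.List.sorted (ns.map (fun n => (n, pvWeightGet weights node n))) (fun x => x.2) true

-- the nested 'def dfs(node)' mutating (visited, ordered); fuel is a totality guard only:
-- under Pre_ the recursion depth is at most the number of graph keys, so graph.length + 1 never runs out
def pvDfsA (graph : List (Int × List Int)) (weights : List (Int × Int × Int)) :
    Nat → Int → (PySem.Set Int × List Int) → (PySem.Set Int × List Int)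
  | 0, _, st => st
  | f + 1, node, st =>
    if PySem.Set.contains st.1 node then st
    else
      (pvSortedNbrs graph weights node).foldl
        (fun s p => if PySem.Set.contains s.1 p.1 then s else pvDfsA graph weights f p.1 s)
        (PySem.Set.add st.1 node, st.2 ++ [node])

def find_optimal_ordering (graph : List (Int × List Int)) (weights : List (Int × Int × Int)) (start_node : Int) : List Int :=
  (pvDfsA graph weights (graph.length + 1) start_node (PySem.Set.empty, [])).2

-- ===== PORT B =====
-- termination facts for the stack loop (cited by name in decreasing_by)
theorem pvGet?_none_of_not_key (graph : List (Int × List Int)) (node : Int)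
    (h : node ∉ graph.map Prod.fst) : (PySem.Dict.mk graph).get? node = none := by
  induction graph with
  | nil => rfl
  | cons p rest ih =>
    simp only [List.map_cons, List.mem_cons, not_or] at h
    rw [PySem.Dict.get?_mk_cons]
    simp only [beq_iff_eq]
    rw [if_neg (fun hx => h.1 hx.symm)]
    exact ih h.2

theorem pvContains_add (vis : PySem.Set Int) (x y : Int) :
    PySem.Set.contains (PySem.Set.add vis x) y = (PySem.Set.contains vis y || y == x) := by
  rw [Bool.eq_iff_iff]
  simp only [Bool.or_eq_true, beq_iff_eq, PySem.Set.contains_iff, PySem.Set.mem_add]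

-- the number of not-yet-visited graph keys strictly drops when an unvisited key is marked
theorem pvMeasure_lt (keys : List Int) (vis : PySem.Set Int) (node : Int)
    (hk : node ∈ keys) (hn : ¬ PySem.Set.contains vis node = true) :
    (keys.filter (fun k => !(PySem.Set.contains (PySem.Set.add vis node) k))).length
      < (keys.filter (fun k => !(PySem.Set.contains vis k))).length := by
  have hrw : (keys.filter (fun k => !(PySem.Set.contains (PySem.Set.add vis node) k)))
      = (keys.filter (fun k => !(PySem.Set.contains vis k))).filter (fun k => !(k == node)) := by
    rw [List.filter_filter]
    apply List.filter_congr
    intro k _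
    rw [pvContains_add]
    cases PySem.Set.contains vis k <;> cases hkx : (k == node) <;> simp
  rw [hrw]
  apply List.length_filter_lt_length_iff_exists.2
  refine ⟨node, List.mem_filter.2 ⟨hk, ?_⟩, by simp⟩
  simpa using hn

-- …and it does not change when the marked node is not a graph key
theorem pvMeasure_eq (keys : List Int) (vis : PySem.Set Int) (node : Int) (hk : node ∉ keys) :
    (keys.filter (fun k => !(PySem.Set.contains (PySem.Set.add vis node) k)))
      = (keys.filter (fun k => !(PySem.Set.contains vis k))) := by
  apply List.filter_congr
  intro k hkm
  rw [pvContains_add]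
  have : (k == node) = false := beq_eq_false_iff_ne.2 (fun h => hk (h ▸ hkm))
  simp [this]

-- the while loop over the explicit stack (head of the list = top of the stack)
def pvLoopB (graph : List (Int × List Int)) (weights : List (Int × Int × Int)) :
    List Int → (PySem.Set Int × List Int) → (PySem.Set Int × List Int)
  | [], st => st
  | node :: rest, st =>
    if PySem.Set.contains st.1 node then pvLoopB graph weights rest st
    else pvLoopB graph weights
      ((pvSortedNbrs graph weights node).map (·.1) ++ rest)
      (PySem.Set.add st.1 node, st.2 ++ [node])
termination_by stack st =>
  (((graph.map Prod.fst).filter (fun k => !(PySem.Set.contains st.1 k))).length, stack.length)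
decreasing_by
  · exact Prod.Lex.right _ (Nat.lt_succ_self _)
  · rename_i hnv
    by_cases hk : node ∈ graph.map Prod.fst
    · exact Prod.Lex.left _ _ (pvMeasure_lt _ _ _ hk hnv)
    · rw [pvMeasure_eq _ _ _ hk]
      have : pvSortedNbrs graph weights node = [] := by
        unfold pvSortedNbrs
        rw [pvGet?_none_of_not_key graph node hk]
        rfl
      rw [this]
      exact Prod.Lex.right _ (by simp)

def find_optimal_ordering_alt (graph : List (Int × List Int)) (weights : List (Int × Int × Int)) (start_node : Int) : List Int :=
  (pvLoopB graph weights [start_node] (PySem.Set.empty, [])).2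

-- ===== PRECONDITION & SPEC =====
-- one parallel closure step: add to s the neighbors of every member of s (non-keys contribute nothing)
def pvReachStep (graph : List (Int × List Int)) (s : List Int) : List Int :=
  s.foldl (fun acc n => PySem.Set.update acc (((PySem.Dict.mk graph).get? n).getD [])) s

-- the set of nodes reachable from start_node (graph.length + 1 parallel steps reach the fixpoint)
def pvReach (graph : List (Int × List Int)) (start_node : Int) : List Int :=
  (pvReachStep graph)^[graph.length + 1] (PySem.Set.ofList [start_node])

-- Python A raises KeyError ('graph[node]') exactly when its DFS reaches a node that is not a key of
-- graph, and the DFS visits precisely the nodes reachable from start_node; so Pre_ is: every node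
-- reachable from start_node is a key of graph — exactly the inputs on which A returns normally.
def Pre_find_optimal_ordering (graph : List (Int × List Int)) (weights : List (Int × Int × Int)) (start_node : Int) : Prop :=
  ∀ n ∈ pvReach graph start_node, n ∈ graph.map Prod.fst
instance (graph : List (Int × List Int)) (weights : List (Int × Int × Int)) (start_node : Int) : Decidable (Pre_find_optimal_ordering graph weights start_node) := by unfold Pre_find_optimal_ordering; infer_instance

def pvWitness_find_optimal_ordering : (List (Int × List Int)) × (List (Int × Int × Int)) × Int :=
  ([(0, [1, 2]), (1, [0, 2]), (2, [])], [(0, 1, 5), (0, 2, 7)], 0)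

def Spec_find_optimal_ordering (graph : List (Int × List Int)) (weights : List (Int × Int × Int)) (start_node : Int) (out : List Int) : Prop := out = find_optimal_ordering_alt graph weights start_node
instance (graph : List (Int × List Int)) (weights : List (Int × Int × Int)) (start_node : Int) (out : List Int) : Decidable (Spec_find_optimal_ordering graph weights start_node out) := by unfold Spec_find_optimal_ordering; infer_instance

-- ===== CLAIM (what is proved, stated in full; the proofs are below) =====
def Claim_equal_find_optimal_ordering : Prop := ∀ (graph : List (Int × List Int)) (weights : List (Int × Int × Int)) (start_node : Int), Dom_find_optimal_ordering graph weights start_node → Pre_find_optimal_ordering graph weights start_node → Spec_find_optimal_ordering graph weights start_node (find_optimal_ordering graph weights start_node)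

-- ===== LEMMAS AND PROOFS =====

theorem pvWitness_ok :
    Dom_find_optimal_ordering pvWitness_find_optimal_ordering.1 pvWitness_find_optimal_ordering.2.1 pvWitness_find_optimal_ordering.2.2
    ∧ Pre_find_optimal_ordering pvWitness_find_optimal_ordering.1 pvWitness_find_optimal_ordering.2.1 pvWitness_find_optimal_ordering.2.2 := by
  constructor <;> decide

theorem pvLength_filter_mono (l : List Int) (p q : Int → Bool)
    (h : ∀ a ∈ l, p a = true → q a = true) :
    (l.filter p).length ≤ (l.filter q).length := by
  induction l with
  | nil => simp
  | cons a l ih =>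
    have ih' := ih (fun b hb hpb => h b (List.mem_cons_of_mem a hb) hpb)
    by_cases hp : p a = true
    · have hq : q a = true := h a List.mem_cons_self hp
      simp only [List.filter_cons, if_pos hp, if_pos hq, List.length_cons]
      omega
    · rw [List.filter_cons, if_neg hp]
      refine le_trans ih' ?_
      rw [List.filter_cons]
      split
      · simp
      · exact le_refl _

-- visited only grows along A's dfs
theorem pvDfsA_vis_mono (graph : List (Int × List Int)) (weights : List (Int × Int × Int)) :
    ∀ (f : Nat) (node : Int) (st : PySem.Set Int × List Int) (k : Int),
      PySem.Set.contains st.1 k = true →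
      PySem.Set.contains (pvDfsA graph weights f node st).1 k = true := by
  intro f
  induction f with
  | zero => intro node st k h; simpa [pvDfsA] using h
  | succ f ih =>
    intro node st k h
    rw [pvDfsA]
    split
    · exact h
    · have step : ∀ (ps : List (Int × Int)) (s : PySem.Set Int × List Int),
          PySem.Set.contains s.1 k = true →
          PySem.Set.contains ((ps.foldl
            (fun s p => if PySem.Set.contains s.1 p.1 then s else pvDfsA graph weights f p.1 s) s).1) k = true := by
        intro ps
        induction ps with
        | nil => intro s hs; exact hs
        | cons p ps ihp =>
          intro s hs
          simp only [List.foldl_cons]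
          apply ihp
          by_cases hc : PySem.Set.contains s.1 p.1 = true
          · rw [if_pos hc]; exact hs
          · rw [if_neg hc]; exact ih p.1 s k hs
      exact step _ _ (by rw [pvContains_add, h]; simp)

-- reachability facts -----------------------------------------------------------

theorem pvFold_update_extensive (graph : List (Int × List Int)) :
    ∀ (l : List Int) (acc : List Int) (x : Int), x ∈ acc →
      x ∈ l.foldl (fun acc n => PySem.Set.update acc (((PySem.Dict.mk graph).get? n).getD [])) acc := by
  intro l
  induction l with
  | nil => intro acc x hx; exact hx
  | cons n l ih =>
    intro acc x hx
    exact ih _ x ((PySem.Set.mem_update _ _ x).2 (Or.inl hx))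

theorem pvReachStep_extensive (graph : List (Int × List Int)) (s : List Int) (x : Int)
    (hx : x ∈ s) : x ∈ pvReachStep graph s :=
  pvFold_update_extensive graph s s x hx

theorem pvReachStep_closure (graph : List (Int × List Int)) (s : List Int) (n m : Int)
    (hn : n ∈ s) (hm : m ∈ ((PySem.Dict.mk graph).get? n).getD []) :
    m ∈ pvReachStep graph s := by
  rw [pvReachStep]
  have aux : ∀ (l : List Int) (acc : List Int), n ∈ l →
      m ∈ l.foldl (fun acc n => PySem.Set.update acc (((PySem.Dict.mk graph).get? n).getD [])) acc := by
    intro l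
    induction l with
    | nil => intro acc h; simp at h
    | cons a l ih =>
      intro acc h
      rcases List.mem_cons.1 h with rfl | h
      · exact pvFold_update_extensive graph l _ m ((PySem.Set.mem_update _ _ m).2 (Or.inr hm))
      · exact ih _ h
  exact aux s s hn

theorem pvReachStep_nodup (graph : List (Int × List Int)) (s : List Int) (hs : s.Nodup) :
    (pvReachStep graph s).Nodup := by
  rw [pvReachStep]
  have aux : ∀ (l : List Int) (acc : List Int), acc.Nodup →
      (l.foldl (fun acc n => PySem.Set.update acc (((PySem.Dict.mk graph).get? n).getD [])) acc).Nodup := by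
    intro l
    induction l with
    | nil => intro acc h; exact h
    | cons a l ih => intro acc h; exact ih _ (PySem.Set.nodup_update _ _ h)
  exact aux s s hs

theorem pvReachStep_append (graph : List (Int × List Int)) (s : List Int) :
    ∃ t, pvReachStep graph s = s ++ t := by
  rw [pvReachStep]
  have aux : ∀ (l : List Int) (acc : List Int), ∃ t,
      l.foldl (fun acc n => PySem.Set.update acc (((PySem.Dict.mk graph).get? n).getD [])) acc = acc ++ t := by
    intro l
    induction l with
    | nil => intro acc; exact ⟨[], (List.append_nil acc).symm⟩
    | cons a l ih =>
      intro acc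
      obtain ⟨t2, ht2⟩ := ih (PySem.Set.update acc (((PySem.Dict.mk graph).get? a).getD []))
      rw [List.foldl_cons, ht2, PySem.Set.update_eq_append_filter, List.append_assoc]
      exact ⟨_, rfl⟩
  exact aux s s

theorem pvReachStep_grow (graph : List (Int × List Int)) (s : List Int) :
    pvReachStep graph s = s ∨ s.length < (pvReachStep graph s).length := by
  obtain ⟨t, ht⟩ := pvReachStep_append graph s
  rcases t with _ | ⟨a, t⟩
  · left; rw [ht, List.append_nil]
  · right; rw [ht]; simp

theorem pvIter_fix (graph : List (Int × List Int)) (s : List Int)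
    (h : pvReachStep graph s = s) : ∀ k, (pvReachStep graph)^[k] s = s := by
  intro k
  induction k with
  | zero => rfl
  | succ k ih => rw [Function.iterate_succ_apply, h, ih]

theorem pvReach_start (graph : List (Int × List Int)) (start_node : Int) :
    start_node ∈ pvReach graph start_node := by
  rw [pvReach]
  have h0 : start_node ∈ (PySem.Set.ofList [start_node] : List Int) := by
    rw [PySem.Set.mem_ofList]; exact List.mem_cons_self
  generalize PySem.Set.ofList [start_node] = s0 at h0
  induction (graph.length + 1) with
  | zero => exact h0
  | succ k ih => rw [Function.iterate_succ_apply']; exact pvReachStep_extensive graph _ _ ih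

theorem pvReach_nodup (graph : List (Int × List Int)) (start_node : Int) (k : Nat) :
    ((pvReachStep graph)^[k] (PySem.Set.ofList [start_node])).Nodup := by
  induction k with
  | zero => exact PySem.Set.nodup_ofList _
  | succ k ih => rw [Function.iterate_succ_apply']; exact pvReachStep_nodup graph _ ih

theorem pvIter_mono (graph : List (Int × List Int)) (s0 : List Int) (j k : Nat) (hjk : j ≤ k) :
    ∀ x ∈ (pvReachStep graph)^[j] s0, x ∈ (pvReachStep graph)^[k] s0 := by
  induction k with
  | zero => intro x hx; rw [Nat.le_zero.1 hjk] at hx; exact hx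
  | succ k ih =>
    intro x hx
    rcases Nat.le_succ_iff_eq_or_le.1 hjk with rfl | hjk'
    · exact hx
    · rw [Function.iterate_succ_apply']
      exact pvReachStep_extensive graph _ _ (ih hjk' x hx)

-- under Pre_ the closure really is a fixpoint after graph.length + 1 steps
theorem pvReach_fix (graph : List (Int × List Int)) (start_node : Int)
    (hpre : ∀ n ∈ pvReach graph start_node, n ∈ graph.map Prod.fst) :
    pvReachStep graph (pvReach graph start_node) = pvReach graph start_node := by
  set s0 := (PySem.Set.ofList [start_node] : List Int) with hs0
  have hsub : ∀ k, k ≤ graph.length + 1 →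
      ((pvReachStep graph)^[k] s0).length ≤ graph.length := by
    intro k hk
    have hnd : ((pvReachStep graph)^[k] s0).Nodup := pvReach_nodup graph start_node k
    have hss : ∀ x ∈ (pvReachStep graph)^[k] s0, x ∈ graph.map Prod.fst := by
      intro x hx
      exact hpre x (pvIter_mono graph s0 k (graph.length + 1) hk x hx)
    calc ((pvReachStep graph)^[k] s0).length
        = ((pvReachStep graph)^[k] s0).toFinset.card := (List.toFinset_card_of_nodup hnd).symm
      _ ≤ (graph.map Prod.fst).toFinset.card := by
          apply Finset.card_le_card
          intro x hx
          rw [List.mem_toFinset] at hx ⊢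
          exact hss x hx
      _ ≤ (graph.map Prod.fst).length := List.toFinset_card_le _
      _ = graph.length := List.length_map ..
  have hfix : ∃ j, j ≤ graph.length ∧
      pvReachStep graph ((pvReachStep graph)^[j] s0) = (pvReachStep graph)^[j] s0 := by
    by_contra hno
    push Not at hno
    have hlen : ∀ j, j ≤ graph.length + 1 → j + 1 ≤ ((pvReachStep graph)^[j] s0).length := by
      intro j
      induction j with
      | zero =>
        intro _
        have : s0 = [start_node] := rfl
        rw [Function.iterate_zero_apply, this]
        simp
      | succ j ih =>
        intro hj
        have hj' : j ≤ graph.length := by omega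
        have hne := hno j hj'
        rcases pvReachStep_grow graph ((pvReachStep graph)^[j] s0) with he | hlt
        · exact absurd he hne
        · have := ih (by omega)
          rw [Function.iterate_succ_apply']
          omega
    have h1 := hlen (graph.length + 1) (le_refl _)
    have h2 := hsub (graph.length + 1) (le_refl _)
    omega
  obtain ⟨j, hj, hfixj⟩ := hfix
  have hdecomp : (pvReachStep graph)^[graph.length + 1] s0 = (pvReachStep graph)^[j] s0 := by
    have : graph.length + 1 = (graph.length + 1 - j) + j := by omega
    rw [this, Function.iterate_add_apply]
    exact pvIter_fix graph _ hfixj _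
  rw [pvReach, ← hs0, hdecomp, hfixj]

-- every neighbor produced for a reachable node is reachable again (R abstracts pvReach)
theorem pvNbrs_reach (graph : List (Int × List Int)) (weights : List (Int × Int × Int))
    (node : Int) (R : List Int)
    (hRc : ∀ n ∈ R, ∀ m ∈ ((PySem.Dict.mk graph).get? n).getD [], m ∈ R)
    (hnode : node ∈ R) :
    ∀ m ∈ (pvSortedNbrs graph weights node).map (·.1), m ∈ R := by
  intro m hm
  simp only [List.mem_map] at hm
  obtain ⟨q, hq, rfl⟩ := hm
  rw [pvSortedNbrs, PySem.List.mem_sorted] at hq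
  simp only [List.mem_map] at hq
  obtain ⟨n, hn', rfl⟩ := hq
  exact hRc node hnode n hn'

-- popping a run of already-visited nodes does nothing
theorem pvLoopB_skip (graph : List (Int × List Int)) (weights : List (Int × Int × Int)) :
    ∀ (ns rest : List Int) (st : PySem.Set Int × List Int),
      (∀ n ∈ ns, PySem.Set.contains st.1 n = true) →
      pvLoopB graph weights (ns ++ rest) st = pvLoopB graph weights rest st := by
  intro ns rest st h
  induction ns with
  | nil => simp
  | cons n ns ih =>
    rw [List.cons_append, pvLoopB, if_pos (h n (List.mem_cons_self))]
    exact ih (fun b hb => h b (List.mem_cons_of_mem n hb))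

-- folding A's dfs over already-visited nodes does nothing either
theorem pvFold_skip (graph : List (Int × List Int)) (weights : List (Int × Int × Int)) (f : Nat) :
    ∀ (ns : List Int) (st : PySem.Set Int × List Int),
      (∀ n ∈ ns, PySem.Set.contains st.1 n = true) →
      ns.foldl (fun s n => if PySem.Set.contains s.1 n then s else pvDfsA graph weights f n s) st = st := by
  intro ns st h
  induction ns with
  | nil => rfl
  | cons n ns ih =>
    rw [List.foldl_cons, if_pos (h n (List.mem_cons_self))]
    exact ih (fun b hb => h b (List.mem_cons_of_mem n hb))

-- core bridge: running the stack loop on ns ++ rest = folding A's dfs over ns, then the loop on rest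
theorem pvLoop_fold (graph : List (Int × List Int)) (weights : List (Int × Int × Int))
    (R : List Int)
    (hR : ∀ n ∈ R, n ∈ graph.map Prod.fst)
    (hRc : ∀ n ∈ R, ∀ m ∈ ((PySem.Dict.mk graph).get? n).getD [], m ∈ R) :
    ∀ (f : Nat) (ns rest : List Int) (st : PySem.Set Int × List Int),
      (∀ n ∈ ns, n ∈ R) →
      ((graph.map Prod.fst).filter (fun k => !(PySem.Set.contains st.1 k))).length ≤ f →
      pvLoopB graph weights (ns ++ rest) st
        = pvLoopB graph weights rest
            (ns.foldl (fun s n => if PySem.Set.contains s.1 n then s else pvDfsA graph weights f n s) st) := by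
  intro f
  induction f with
  | zero =>
    intro ns rest st hns hf
    have hall : ∀ n ∈ ns, PySem.Set.contains st.1 n = true := by
      intro n hn
      by_contra hc
      have hfe : (graph.map Prod.fst).filter (fun k => !(PySem.Set.contains st.1 k)) = [] :=
        List.eq_nil_of_length_eq_zero (Nat.le_zero.1 hf)
      have hmem : n ∈ (graph.map Prod.fst).filter (fun k => !(PySem.Set.contains st.1 k)) :=
        List.mem_filter.2 ⟨hR n (hns n hn), by simpa using hc⟩
      rw [hfe] at hmem
      simp at hmem
    rw [pvLoopB_skip graph weights ns rest st hall, pvFold_skip graph weights 0 ns st hall]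
  | succ f ihf =>
    intro ns rest st
    induction ns generalizing st with
    | nil => intro _ _; simp
    | cons n ns ihn =>
      intro hns hf
      have hnR : n ∈ R := hns n List.mem_cons_self
      have hnk : n ∈ graph.map Prod.fst := hR n hnR
      have hns' : ∀ b ∈ ns, b ∈ R := fun b hb => hns b (List.mem_cons_of_mem n hb)
      rw [List.cons_append, List.foldl_cons]
      by_cases hv : PySem.Set.contains st.1 n = true
      · rw [pvLoopB, if_pos hv, if_pos hv]
        exact ihn st hns' hf
      · rw [pvLoopB, if_neg hv, if_neg hv]
        have hfuel1 : ((graph.map Prod.fst).filter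
            (fun k => !(PySem.Set.contains (PySem.Set.add st.1 n) k))).length ≤ f := by
          have := pvMeasure_lt (graph.map Prod.fst) st.1 n hnk hv
          omega
        rw [ihf ((pvSortedNbrs graph weights n).map (·.1)) (ns ++ rest)
            (PySem.Set.add st.1 n, st.2 ++ [n]) (pvNbrs_reach graph weights n R hRc hnR) hfuel1]
        have hdfs : ((pvSortedNbrs graph weights n).map (·.1)).foldl
            (fun s m => if PySem.Set.contains s.1 m then s else pvDfsA graph weights f m s)
            (PySem.Set.add st.1 n, st.2 ++ [n]) = pvDfsA graph weights (f + 1) n st := by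
          rw [pvDfsA, if_neg hv, List.foldl_map]
        rw [hdfs]
        have hfuel2 : ((graph.map Prod.fst).filter
            (fun k => !(PySem.Set.contains (pvDfsA graph weights (f + 1) n st).1 k))).length ≤ f + 1 := by
          refine le_trans (pvLength_filter_mono _ _ _ ?_) hf
          intro a _ ha
          simp only [Bool.not_eq_true'] at ha ⊢
          by_contra hc
          rw [pvDfsA_vis_mono graph weights (f + 1) n st a
            (by simpa using hc)] at ha
          exact absurd ha (by simp)
        exact ihn (pvDfsA graph weights (f + 1) n st) hns' hfuel2

-- ===== VERDICT (by name: the statement is the Claim_ definition above) =====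
theorem find_optimal_ordering_spec : Claim_equal_find_optimal_ordering := by
  intro graph weights start_node _ hpre
  unfold Spec_find_optimal_ordering find_optimal_ordering find_optimal_ordering_alt
  have hfix := pvReach_fix graph start_node hpre
  have hRc : ∀ n ∈ pvReach graph start_node, ∀ m ∈ ((PySem.Dict.mk graph).get? n).getD [],
      m ∈ pvReach graph start_node := by
    intro n hn m hm
    rw [← hfix]
    exact pvReachStep_closure graph _ n m hn hm
  have h := pvLoop_fold graph weights (pvReach graph start_node) hpre hRc
    (graph.length + 1) [start_node] [] (PySem.Set.empty, [])
    (by intro n hn; rw [List.mem_singleton] at hn; exact hn ▸ pvReach_start graph start_node)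
    (by
      refine le_trans (le_trans (List.length_filter_le _ _) ?_) (Nat.le_succ _)
      rw [List.length_map])
  rw [List.append_nil] at h
  have hemp : PySem.Set.contains (PySem.Set.empty : PySem.Set Int) start_node = false := rfl
  rw [List.foldl_cons, List.foldl_nil, if_neg (by rw [hemp]; simp)] at h
  rw [h, pvLoopB]
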